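-- pv_equiv track=rewrite | github.com/cxMoonGlade/QIP_IGNN | barren_plateau_analysis.py | completed_point_keys
-- ===== SOURCE A (Python) =====
-- from typing import Dict, List, Optional, Tuple
--
-- def completed_point_keys(rows: List[Dict[str, str]], n_resamples_target: int,
--                          required_groups: set) -> set:
--     """Return the set of (variant, axis, n_qubits, circuit_reps, max_iter) grid
--     points that are considered complete in the existing CSV:
--         - all required_groups present
--         - n_resamples_completed >= n_resamples_target (old CSVs without this
--           column are treated as complete at their n_resamples value)
--         - timed_out is False (timed-out points are retried)
--     """
--     groups_by_key: Dict[Tuple, set] = {}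
--     meta_by_key: Dict[Tuple, Dict] = {}
--     for r in rows:
--         try:
--             key = (
--                 r.get("variant", ""),
--                 r.get("axis", ""),
--                 int(r.get("n_qubits") or 0),
--                 int(r.get("circuit_reps") or 0),
--                 int(r.get("max_iter") or 0),
--             )
--         except (TypeError, ValueError):
--             continue
--         groups_by_key.setdefault(key, set()).add(r.get("group", ""))
--         # Take the max observed n_resamples_completed across groups of a key.
--         if "n_resamples_completed" in r and r["n_resamples_completed"] not in ("", None):
--             try:
--                 n_completed = int(r["n_resamples_completed"])
--             except ValueError:
--                 n_completed = 0
--         else: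
--             try:
--                 n_completed = int(r.get("n_resamples") or 0)
--             except ValueError:
--                 n_completed = 0
--         to = str(r.get("timed_out", "")).strip().lower() in ("1", "true", "t", "yes")
--         prev = meta_by_key.get(key, {"n_completed": 0, "timed_out": False})
--         meta_by_key[key] = {
--             "n_completed": max(prev["n_completed"], n_completed),
--             "timed_out": prev["timed_out"] or to,
--         }
--     done = set()
--     for key, groups in groups_by_key.items():
--         meta = meta_by_key[key]
--         if meta["timed_out"]:
--             continue
--         if meta["n_completed"] < n_resamples_target:
--             continue
--         if not required_groups.issubset(groups):
--             continue
--         done.add(key)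
--     return done
-- ===== SOURCE B (Python) =====
-- from typing import Dict, List, Tuple
--
-- def completed_point_keys(rows: List[Dict[str, str]], n_resamples_target: int,
--                          required_groups: set) -> set:
--     # Two-phase decomposition: collect per-key observations first, aggregate later.
--     vals_by_key: Dict[Tuple, List[Tuple[int, bool]]] = {}
--     groups_by_key: Dict[Tuple, set] = {}
--     for r in rows:
--         try:
--             key = (
--                 r.get("variant", ""),
--                 r.get("axis", ""),
--                 int(r.get("n_qubits") or 0),
--                 int(r.get("circuit_reps") or 0),
--                 int(r.get("max_iter") or 0),
--             )
--         except (TypeError, ValueError):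
--             continue
--         groups_by_key.setdefault(key, set()).add(r.get("group", ""))
--         if "n_resamples_completed" in r and r["n_resamples_completed"] not in ("", None):
--             try:
--                 n_completed = int(r["n_resamples_completed"])
--             except ValueError:
--                 n_completed = 0
--         else:
--             try:
--                 n_completed = int(r.get("n_resamples") or 0)
--             except ValueError:
--                 n_completed = 0
--         timed = str(r.get("timed_out", "")).strip().lower() in ("1", "true", "t", "yes")
--         vals_by_key.setdefault(key, []).append((n_completed, timed))
--     return {
--         key
--         for key, vals in vals_by_key.items()
--         if not any(t for _, t in vals)
--         and max([0] + [n for n, _ in vals]) >= n_resamples_target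
--         and required_groups.issubset(groups_by_key[key])
--     }
-- ===== Notes on version B (the rewrite author's own statement) =====
-- stated objective: alternative
-- what changed: Instead of folding a running max/OR per key while scanning rows, B collects each key's parsed (n_completed, timed_out) observations into per-key lists in one pass and computes the aggregates (any timed_out, max n_completed) only in a second pass, emitting the result as a set comprehension.
import Mathlib
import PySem

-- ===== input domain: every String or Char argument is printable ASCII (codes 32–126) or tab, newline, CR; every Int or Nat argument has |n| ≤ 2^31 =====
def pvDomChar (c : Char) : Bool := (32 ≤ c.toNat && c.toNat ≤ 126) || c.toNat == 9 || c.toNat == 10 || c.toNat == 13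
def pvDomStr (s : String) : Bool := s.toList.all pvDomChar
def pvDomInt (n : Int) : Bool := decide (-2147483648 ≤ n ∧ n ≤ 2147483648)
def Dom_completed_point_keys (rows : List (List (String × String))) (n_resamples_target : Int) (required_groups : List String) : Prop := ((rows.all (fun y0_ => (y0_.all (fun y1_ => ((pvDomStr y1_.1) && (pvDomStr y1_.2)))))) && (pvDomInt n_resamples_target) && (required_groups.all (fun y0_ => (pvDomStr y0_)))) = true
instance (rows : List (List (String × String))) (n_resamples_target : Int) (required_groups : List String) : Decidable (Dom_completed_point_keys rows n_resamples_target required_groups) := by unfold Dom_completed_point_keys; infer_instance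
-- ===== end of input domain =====

-- B defers the per-key max/any aggregation to a second pass over collected observation lists;
-- objective: alternative decomposition, return value proved equal (Python sets compared as sets).

-- Shared row-parsing helpers (both Pythons derive per-row values by the identical rules).
abbrev PKey := String × String × Int × Int × Int

-- int(r.get(k) or 0): missing or "" gives 0; otherwise int(s) (none = ValueError → row skipped)
def pvIntField (d : PySem.Dict String String) (k : String) : Option Int :=
  match d.get? k with
  | none => some 0
  | some s => if s = "" then some 0 else PySem.Int.ofStr? s

def pvRowKey (d : PySem.Dict String String) : Option PKey :=
  match pvIntField d "n_qubits", pvIntField d "circuit_reps", pvIntField d "max_iter" with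
  | some a, some b, some c => some (d.getD "variant" "", d.getD "axis" "", a, b, c)
  | _, _, _ => none

-- int(r.get("n_resamples") or 0) with ValueError → 0
def pvFallbackNC (d : PySem.Dict String String) : Int :=
  match d.get? "n_resamples" with
  | none => 0
  | some s => if s = "" then 0 else (PySem.Int.ofStr? s).getD 0

def pvRowNC (d : PySem.Dict String String) : Int :=
  match d.get? "n_resamples_completed" with
  | some s => if s = "" then pvFallbackNC d else (PySem.Int.ofStr? s).getD 0
  | none => pvFallbackNC d

def pvRowTO (d : PySem.Dict String String) : Bool :=
  ["1", "true", "t", "yes"].contains (PySem.Str.lower (PySem.Str.strip (d.getD "timed_out" "")))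

-- ===== PORT A =====
def pvStepA (st : PySem.Dict PKey (PySem.Set String) × PySem.Dict PKey (Int × Bool))
    (r : List (String × String)) :
    PySem.Dict PKey (PySem.Set String) × PySem.Dict PKey (Int × Bool) :=
  let d := PySem.Dict.ofList r
  match pvRowKey d with
  | none => st
  | some key =>
    let g := PySem.Dict.modify st.1 key PySem.Set.empty
      (fun s => PySem.Set.add s (d.getD "group" ""))
    let prev := PySem.Dict.getD st.2 key ((0 : Int), false)
    let m := PySem.Dict.insert st.2 key (max prev.1 (pvRowNC d), prev.2 || pvRowTO d)
    (g, m)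

def completed_point_keys (rows : List (List (String × String))) (n_resamples_target : Int) (required_groups : List String) : List (String × String × Int × Int × Int) :=
  let st := rows.foldl pvStepA (PySem.Dict.empty, PySem.Dict.empty)
  -- meta_by_key[key] never misses here; getD is its value
  (PySem.Dict.items st.1).foldl (fun done kg =>
    let mt := PySem.Dict.getD st.2 kg.1 ((0 : Int), false)
    if mt.2 then done
    else if mt.1 < n_resamples_target then done
    else if !(PySem.Set.issubset required_groups kg.2) then done
    else PySem.Set.add done kg.1) PySem.Set.empty

-- ===== PORT B =====
def pvStepB (st : PySem.Dict PKey (PySem.Set String) × PySem.Dict PKey (List (Int × Bool)))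
    (r : List (String × String)) :
    PySem.Dict PKey (PySem.Set String) × PySem.Dict PKey (List (Int × Bool)) :=
  let d := PySem.Dict.ofList r
  match pvRowKey d with
  | none => st
  | some key =>
    (PySem.Dict.modify st.1 key PySem.Set.empty
       (fun s => PySem.Set.add s (d.getD "group" "")),
     PySem.Dict.modify st.2 key [] (fun l => l ++ [(pvRowNC d, pvRowTO d)]))

def completed_point_keys_alt (rows : List (List (String × String))) (n_resamples_target : Int) (required_groups : List String) : List (String × String × Int × Int × Int) :=
  let st := rows.foldl pvStepB (PySem.Dict.empty, PySem.Dict.empty)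
  -- set comprehension over vals_by_key.items(); groups_by_key[key] never misses
  PySem.Set.ofList (((PySem.Dict.items st.2).filter (fun kv =>
      !(kv.2.any (fun p => p.2)) &&
      decide (n_resamples_target ≤ (PySem.List.max? ((0 : Int) :: kv.2.map (fun p => p.1)) (fun x => x)).getD 0) &&
      PySem.Set.issubset required_groups (PySem.Dict.getD st.1 kv.1 PySem.Set.empty))).map (fun kv => kv.1))

-- ===== PRECONDITION & SPEC =====
def Spec_completed_point_keys (rows : List (List (String × String))) (n_resamples_target : Int) (required_groups : List String) (out : List (String × String × Int × Int × Int)) : Prop := out = completed_point_keys_alt rows n_resamples_target required_groups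
instance (rows : List (List (String × String))) (n_resamples_target : Int) (required_groups : List String) (out : List (String × String × Int × Int × Int)) : Decidable (Spec_completed_point_keys rows n_resamples_target required_groups out) := by unfold Spec_completed_point_keys; infer_instance

-- ===== CLAIM (what is proved, stated in full; the proofs are below) =====
def Claim_equal_completed_point_keys : Prop := ∀ (rows : List (List (String × String))) (n_resamples_target : Int) (required_groups : List String), Dom_completed_point_keys rows n_resamples_target required_groups → Spec_completed_point_keys rows n_resamples_target required_groups (completed_point_keys rows n_resamples_target required_groups)

-- ===== LEMMAS AND PROOFS =====

-- aggregate of a key's collected (n_completed, timed_out) observations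
def pvAgg (l : List (Int × Bool)) : Int × Bool :=
  ((l.map (fun p => p.1)).foldl max 0, l.any (fun p => p.2))

lemma pvAgg_append (l : List (Int × Bool)) (n : Int) (b : Bool) :
    pvAgg (l ++ [(n, b)]) = (max (pvAgg l).1 n, (pvAgg l).2 || b) := by
  simp [pvAgg]

-- invariant relating A's running (max, or) meta dict to B's observation-list dict
def pvRel (g : PySem.Dict PKey (PySem.Set String)) (m : PySem.Dict PKey (Int × Bool))
    (v : PySem.Dict PKey (List (Int × Bool))) : Prop :=
  m.keys = v.keys ∧ g.keys = m.keys ∧ g.keys.Nodup ∧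
  ∀ k, m.getD k ((0 : Int), false) = pvAgg (v.getD k [])

lemma pvFold_inv (rows : List (List (String × String)))
    (g : PySem.Dict PKey (PySem.Set String)) (m : PySem.Dict PKey (Int × Bool))
    (v : PySem.Dict PKey (List (Int × Bool))) (h : pvRel g m v) :
    (rows.foldl pvStepA (g, m)).1 = (rows.foldl pvStepB (g, v)).1 ∧
    pvRel (rows.foldl pvStepA (g, m)).1 (rows.foldl pvStepA (g, m)).2
      (rows.foldl pvStepB (g, v)).2 := by
  induction rows generalizing g m v with
  | nil => exact ⟨rfl, h⟩
  | cons r rows ih =>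
    obtain ⟨h1, h2, h3, h4⟩ := h
    simp only [List.foldl_cons]
    cases hk : pvRowKey (PySem.Dict.ofList r) with
    | none =>
      have ha : pvStepA (g, m) r = (g, m) := by simp [pvStepA, hk]
      have hb : pvStepB (g, v) r = (g, v) := by simp [pvStepB, hk]
      rw [ha, hb]; exact ih _ _ _ ⟨h1, h2, h3, h4⟩
    | some key =>
      have ha : pvStepA (g, m) r =
          (PySem.Dict.modify g key PySem.Set.empty
             (fun s => PySem.Set.add s ((PySem.Dict.ofList r).getD "group" "")),
           PySem.Dict.insert m key
             (max (PySem.Dict.getD m key ((0 : Int), false)).1 (pvRowNC (PySem.Dict.ofList r)),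
              (PySem.Dict.getD m key ((0 : Int), false)).2 || pvRowTO (PySem.Dict.ofList r))) := by
        simp [pvStepA, hk]
      have hb : pvStepB (g, v) r =
          (PySem.Dict.modify g key PySem.Set.empty
             (fun s => PySem.Set.add s ((PySem.Dict.ofList r).getD "group" "")),
           PySem.Dict.modify v key []
             (fun l => l ++ [(pvRowNC (PySem.Dict.ofList r), pvRowTO (PySem.Dict.ofList r))])) := by
        simp [pvStepB, hk]
      rw [ha, hb]
      apply ih
      have hcv : v.contains key = m.contains key := by
        rw [PySem.Dict.contains_eq_decide_mem_keys, PySem.Dict.contains_eq_decide_mem_keys, h1]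
      have hcg : g.contains key = m.contains key := by
        rw [PySem.Dict.contains_eq_decide_mem_keys, PySem.Dict.contains_eq_decide_mem_keys, h2]
      refine ⟨?_, ?_, ?_, ?_⟩
      · rw [PySem.Dict.keys_modify]
        cases hc : m.contains key with
        | false =>
          rw [PySem.Dict.keys_insert_of_not_contains _ _ hc,
            PySem.Dict.keys_insert_of_not_contains _ _ (hcv.trans hc), h1]
        | true =>
          rw [PySem.Dict.keys_insert_of_contains _ _ hc,
            PySem.Dict.keys_insert_of_contains _ _ (hcv.trans hc), h1]
      · rw [PySem.Dict.keys_modify]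
        cases hc : m.contains key with
        | false =>
          rw [PySem.Dict.keys_insert_of_not_contains _ _ (hcg.trans hc),
            PySem.Dict.keys_insert_of_not_contains _ _ hc, h2]
        | true =>
          rw [PySem.Dict.keys_insert_of_contains _ _ (hcg.trans hc),
            PySem.Dict.keys_insert_of_contains _ _ hc, h2]
      · rw [PySem.Dict.keys_modify]
        cases hc : g.contains key with
        | false =>
          have hmem : key ∉ g.keys := by
            rw [PySem.Dict.contains_eq_decide_mem_keys] at hc
            simpa using hc
          rw [PySem.Dict.keys_insert_of_not_contains _ _ hc]
          refine List.Nodup.append h3 (List.nodup_singleton _) ?_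
          intro x hx hx'
          simp only [List.mem_singleton] at hx'
          exact hmem (hx' ▸ hx)
        | true => rw [PySem.Dict.keys_insert_of_contains _ _ hc]; exact h3
      · intro j
        rw [PySem.Dict.getD_insert, PySem.Dict.getD_modify]
        by_cases hj : j = key
        · subst hj
          rw [if_pos rfl, if_pos rfl, h4 j, pvAgg_append]
        · simp only [if_neg hj]
          exact h4 j

-- the acceptance test of the second pass, as a Bool predicate on a (key, groups) item
def pvQA (t : Int) (rg : List String) (m : PySem.Dict PKey (Int × Bool))
    (kg : PKey × PySem.Set String) : Bool :=
  !(m.getD kg.1 ((0 : Int), false)).2 &&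
  decide (t ≤ (m.getD kg.1 ((0 : Int), false)).1) &&
  PySem.Set.issubset rg kg.2

-- A's done-building fold is "append the keys passing pvQA" when keys are distinct
lemma pvFoldDone (t : Int) (rg : List String) (m : PySem.Dict PKey (Int × Bool))
    (items : List (PKey × PySem.Set String)) (done : PySem.Set PKey)
    (hnin : ∀ p ∈ items, p.1 ∉ done) (hnd : (items.map (fun p => p.1)).Nodup) :
    items.foldl (fun done kg =>
        let mt := PySem.Dict.getD m kg.1 ((0 : Int), false)
        if mt.2 then done
        else if mt.1 < t then done
        else if !(PySem.Set.issubset rg kg.2) then done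
        else PySem.Set.add done kg.1) done
      = done ++ (items.filter (pvQA t rg m)).map (fun p => p.1) := by
  have hbody : (fun (done : PySem.Set PKey) (kg : PKey × PySem.Set String) =>
      let mt := PySem.Dict.getD m kg.1 ((0 : Int), false)
      if mt.2 then done
      else if mt.1 < t then done
      else if !(PySem.Set.issubset rg kg.2) then done
      else PySem.Set.add done kg.1)
      = (fun done kg => if pvQA t rg m kg then PySem.Set.add done kg.1 else done) := by
    funext done kg
    by_cases c1 : (m.getD kg.1 ((0 : Int), false)).2 <;>
      by_cases c2 : (m.getD kg.1 ((0 : Int), false)).1 < t <;>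
      by_cases c3 : PySem.Set.issubset rg kg.2 <;>
      simp [pvQA, c1, c2, c3] at *
  rw [hbody]
  clear hbody
  induction items generalizing done with
  | nil => simp
  | cons kg rest ih =>
    simp only [List.map_cons, List.nodup_cons, List.mem_map] at hnd
    simp only [List.foldl_cons, List.filter_cons]
    by_cases hq : pvQA t rg m kg = true
    · rw [if_pos hq, if_pos hq,
        PySem.Set.add_of_not_mem (hnin kg (List.mem_cons_self))]
      rw [ih (done ++ [kg.1])
        (fun p hp => by
          simp only [List.mem_append, List.mem_singleton]
          rintro (hin | he)
          · exact hnin p (List.mem_cons_of_mem _ hp) hin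
          · exact hnd.1 ⟨p, hp, he⟩)
        hnd.2]
      simp
    · rw [if_neg hq, if_neg hq]
      exact ih done (fun p hp => hnin p (List.mem_cons_of_mem _ hp)) hnd.2

-- ===== VERDICT (by name: the statement is the Claim_ definition above) =====
theorem completed_point_keys_spec : Claim_equal_completed_point_keys := by
  intro rows t rg _
  unfold Spec_completed_point_keys completed_point_keys completed_point_keys_alt
  obtain ⟨hg, h1, h2, h3, h4⟩ :=
    pvFold_inv rows PySem.Dict.empty PySem.Dict.empty PySem.Dict.empty
      ⟨rfl, rfl, by simp [PySem.Dict.keys_empty], fun k => by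
        simp [PySem.Dict.getD_empty, pvAgg]⟩
  set sA := rows.foldl pvStepA (PySem.Dict.empty, PySem.Dict.empty) with hsA
  set sB := rows.foldl pvStepB (PySem.Dict.empty, PySem.Dict.empty) with hsB
  -- A side: the done-building fold is a filter over keys
  rw [pvFoldDone t rg sA.2 sA.1.items PySem.Set.empty (by intro p hp; simp [PySem.Set.empty])
    (by exact h3)]
  have hvnd : sB.2.keys.Nodup := by rw [← h1, ← h2]; exact h3
  have hvnd' : (sB.2.items.map (fun p => p.1)).Nodup := hvnd
  rw [PySem.Set.ofList_eq_self_of_nodup _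
    (hvnd'.sublist (List.Sublist.map _ List.filter_sublist))]
  rw [PySem.Dict.items_eq_map_keys sA.1 h3 PySem.Set.empty,
    PySem.Dict.items_eq_map_keys sB.2 hvnd []]
  rw [List.filter_map, List.filter_map, List.map_map, List.map_map]
  have hkeys : sB.2.keys = sA.1.keys := by rw [← h1, ← h2]
  rw [hkeys]
  have hmapid : ∀ (l : List PKey), List.map ((fun (p : PKey × PySem.Set String) => p.1) ∘ (fun k => (k, sA.1.getD k PySem.Set.empty))) l = l := by
    intro l; simp [Function.comp_def]
  have hmapid2 : ∀ (l : List PKey), List.map ((fun (p : PKey × List (Int × Bool)) => p.1) ∘ (fun k => (k, sB.2.getD k []))) l = l := by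
    intro l; simp [Function.comp_def]
  rw [hmapid, hmapid2]
  apply List.filter_congr
  intro k _
  simp only [Function.comp_def, pvQA, ← hg, h4 k, pvAgg, PySem.List.max?_id_cons,
    Option.getD_some]
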